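-- pv_equiv track=rewrite | github.com/ManuelKraft/Bachelor-Arbeit | Transformation.py | Update_String
-- ===== SOURCE A (Python) =====
-- def Update_String(Row, List2, k):
--     j = 0
--     while j <= 4:
--         x = 0
--         y = 0
--         counter = 0
--         while Row[x + counter:].find(',') != -1:
--             x += Row[x + counter:].find(',')
--             counter += 1
--             if counter == j + 2:
--                 y = x
--             elif counter == j + 3:
--                 Row = Row[:y + counter - 1] + str(List2[k + 2*j]) + Row[x + counter - 1:]
--                 break
--         j += 1
--     return Row
-- ===== SOURCE B (Python) =====
-- def Update_String(Row, List2, k):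
--     parts = Row.split(',')
--     for i in range(2, 7):
--         if len(parts) >= i + 2:
--             parts[i] = str(List2[k + 2*(i - 2)])
--     return ','.join(parts)
-- ===== Notes on version B (the rewrite author's own statement) =====
-- stated objective: simpler
-- what changed: B splits the row once on commas, overwrites fields 2..6 in the resulting list when a comma follows them, and joins once, instead of A's five restarted find(',') scans with accumulated offsets and slice-and-concatenate splicing.
import Mathlib
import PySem

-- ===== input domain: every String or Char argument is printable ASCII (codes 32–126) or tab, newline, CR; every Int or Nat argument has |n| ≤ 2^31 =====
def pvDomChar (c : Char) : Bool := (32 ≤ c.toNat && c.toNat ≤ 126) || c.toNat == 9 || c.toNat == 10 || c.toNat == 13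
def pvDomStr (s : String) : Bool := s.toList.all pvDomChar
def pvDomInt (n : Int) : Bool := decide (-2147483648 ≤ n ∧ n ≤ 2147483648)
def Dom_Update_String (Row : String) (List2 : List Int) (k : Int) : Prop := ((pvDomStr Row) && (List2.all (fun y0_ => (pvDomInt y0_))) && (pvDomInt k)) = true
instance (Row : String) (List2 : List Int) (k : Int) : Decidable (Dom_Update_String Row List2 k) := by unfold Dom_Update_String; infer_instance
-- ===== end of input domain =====

-- B replaces A's five restarted find(',') scans with slice-and-concatenate splicing by one split on ',', direct field updates, and one join: a simpler decomposition with the same behaviour.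


-- ===== PORT A =====
-- inner `while Row[x+counter:].find(',') != -1` loop of A; fuel ≥ number of commas + 1,
-- which the outer caller supplies as cs.length + 1 (each iteration consumes one comma).
def pvInnerA (List2 : List Int) (k j : Int) (fuel : Nat) (cs : List Char) (x y counter : Int) : List Char :=
  match fuel with
  | 0 => cs
  | fuel + 1 =>
    if PySem.Chars.find (PySem.Chars.slice cs (some (x + counter)) none) [','] ≠ -1 then
      let x' := x + PySem.Chars.find (PySem.Chars.slice cs (some (x + counter)) none) [',']
      let counter' := counter + 1
      if counter' = j + 2 then
        pvInnerA List2 k j fuel cs x' x' counter'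
      else if counter' = j + 3 then
        PySem.Chars.slice cs none (some (y + counter' - 1))
          ++ PySem.Int.toChars (PySem.List.pyGetD List2 (k + 2 * j) 0)
          ++ PySem.Chars.slice cs (some (x' + counter' - 1)) none
      else
        pvInnerA List2 k j fuel cs x' y counter'
    else cs

def Update_String (Row : String) (List2 : List Int) (k : Int) : String :=
  String.ofList ((PySem.List.pyRange 0 5 1).foldl
    (fun cs j => pvInnerA List2 k j (cs.length + 1) cs 0 0 0) Row.toList)

-- ===== PORT B =====
def Update_String_alt (Row : String) (List2 : List Int) (k : Int) : String :=
  let parts := PySem.Chars.splitOn Row.toList [',']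
  let parts := (PySem.List.pyRange 2 7 1).foldl
    (fun ps i =>
      if (ps.length : Int) ≥ i + 2 then
        ps.set i.toNat (PySem.Int.toChars (PySem.List.pyGetD List2 (k + 2 * (i - 2)) 0))
      else ps) parts
  String.ofList (PySem.Chars.join [','] parts)

-- ===== PRECONDITION & SPEC =====
-- Pre_ excludes exactly the inputs on which Python A raises IndexError: whenever pass j
-- (j = 0..4) performs its replacement (the row contains at least j+3 commas), the index
-- k+2j into List2 must be in Python's accepted range [-len(List2), len(List2)).
def Pre_Update_String (Row : String) (List2 : List Int) (k : Int) : Prop :=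
  ∀ j ∈ ([0, 1, 2, 3, 4] : List Int),
    j + 3 ≤ (PySem.Str.count Row "," : Int) →
      -(List2.length : Int) ≤ k + 2 * j ∧ k + 2 * j < (List2.length : Int)
instance (Row : String) (List2 : List Int) (k : Int) : Decidable (Pre_Update_String Row List2 k) := by
  unfold Pre_Update_String; infer_instance
def pvWitness_Update_String : String × List Int × Int := ("a,b,c,d", [7], 0)

def Spec_Update_String (Row : String) (List2 : List Int) (k : Int) (out : String) : Prop := out = Update_String_alt Row List2 k
instance (Row : String) (List2 : List Int) (k : Int) (out : String) : Decidable (Spec_Update_String Row List2 k out) := by unfold Spec_Update_String; infer_instance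

-- ===== CLAIM (what is proved, stated in full; the proofs are below) =====
def Claim_equal_Update_String : Prop := ∀ (Row : String) (List2 : List Int) (k : Int), Dom_Update_String Row List2 k → Pre_Update_String Row List2 k → Spec_Update_String Row List2 k (Update_String Row List2 k)

-- ===== LEMMAS AND PROOFS =====

-- PySem's splitOn on a one-character separator is Mathlib's splitOn (= splitOnP).
theorem pv_go_spec (c : Char) : ∀ (fuel : Nat) (l cur : List Char) (acc : List (List Char)), l.length < fuel →
    PySem.Chars.splitOn.go [c] fuel l cur acc
      = acc.reverse ++ (List.splitOnP (· == c) l).modifyHead (cur.reverse ++ ·) := by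
  intro fuel
  induction fuel with
  | zero => intro l cur acc h; omega
  | succ f ih =>
    intro l cur acc h
    cases l with
    | nil => rw [PySem.Chars.splitOn.go.eq_def]; simp [List.splitOnP_nil]
    | cons x rest =>
      rw [PySem.Chars.splitOn.go.eq_def]
      simp only []
      by_cases hx : x = c
      · subst hx
        simp only [List.isPrefixOf_cons₂, List.isPrefixOf_nil_left, Bool.and_true, beq_self_eq_true, if_pos]
        rw [ih _ _ _ (by simpa using Nat.lt_of_succ_lt_succ h)]
        simp [List.splitOnP_cons]
        exact congrFun List.modifyHead_id _
      · have hpre : [c].isPrefixOf (x :: rest) = false := by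
          simp [List.isPrefixOf_cons₂]; exact fun hcx => absurd hcx.symm hx
        rw [hpre]
        simp only [Bool.false_eq_true, if_false]
        rw [ih _ _ _ (by simpa using Nat.lt_of_succ_lt_succ h)]
        rw [List.splitOnP_cons]
        have hxc : (x == c) = false := by simp [hx]
        rw [hxc]
        simp only [Bool.false_eq_true, if_false]
        rcases List.exists_cons_of_ne_nil (List.splitOnP_ne_nil (· == c) rest) with ⟨hd, tl, heq⟩
        simp [heq]

theorem pv_splitOn_bridge (c : Char) (s : List Char) :
    PySem.Chars.splitOn s [c] = List.splitOn c s := by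
  rw [PySem.Chars.splitOn, pv_go_spec c _ _ _ _ (by omega)]
  rcases List.exists_cons_of_ne_nil (List.splitOnP_ne_nil (· == c) s) with ⟨hd, tl, heq⟩
  show _ ++ (List.splitOnP (· == c) s).modifyHead _ = _
  simp [List.splitOn, heq]


-- every entry of List.splitOn ',' cs is comma-free
theorem pv_splitOn_comma_free (cs : List Char) : ∀ p ∈ List.splitOn ',' cs, ',' ∉ p := by
  induction cs with
  | nil => intro p hp; simp [List.splitOn, List.splitOnP_nil] at hp; simp [hp]
  | cons x rest ih =>
    intro p hp
    rw [List.splitOn, List.splitOnP_cons] at hp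
    by_cases hx : x = ','
    · subst hx; simp at hp
      rcases hp with hp | hp
      · simp [hp]
      · exact ih p hp
    · have hxc : (x == ',') = false := by simp [hx]
      rw [hxc] at hp
      simp only [Bool.false_eq_true, if_false] at hp
      rcases List.exists_cons_of_ne_nil (List.splitOnP_ne_nil (· == ',') rest) with ⟨hd, tl, heq⟩
      rw [heq] at hp
      simp only [List.modifyHead_cons, List.mem_cons] at hp
      rcases hp with hp | hp
      · subst hp
        intro hmem
        rcases List.mem_cons.1 hmem with h | h
        · exact hx h.symm
        · exact ih hd (by rw [List.splitOn, heq]; exact List.mem_cons_self) h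
      · exact ih p (by rw [List.splitOn, heq]; exact List.mem_cons_of_mem _ hp)

theorem pv_splitOn_length (cs : List Char) : (List.splitOn ',' cs).length ≤ cs.length + 1 := by
  induction cs with
  | nil => simp [List.splitOn, List.splitOnP_nil]
  | cons x rest ih =>
    rw [List.splitOn, List.splitOnP_cons]
    by_cases hx : (x == ',') = true
    · rw [if_pos hx]; simpa [List.splitOn] using ih
    · rw [if_neg hx]
      calc ((List.splitOnP (· == ',') rest).modifyHead (x :: ·)).length
          = (List.splitOnP (· == ',') rest).length := by simp
        _ ≤ rest.length + 1 := by simpa [List.splitOn] using ih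
        _ ≤ (x :: rest).length + 1 := by simp

-- find(',') on a comma-free string is -1
theorem pv_find_no_comma (q : List Char) (h : ',' ∉ q) : PySem.Chars.find q [','] = -1 := by
  rw [PySem.Chars.find_eq_neg_one_iff]
  intro hinf
  rcases hinf with ⟨s, t, hst⟩
  exact h (by rw [← hst]; simp)

-- find(',') on q ++ ',' :: t with q comma-free is exactly q.length
theorem pv_find_comma (q t : List Char) (h : ',' ∉ q) :
    PySem.Chars.find (q ++ ',' :: t) [','] = (q.length : Int) := by
  have hnn : 0 ≤ PySem.Chars.find (q ++ ',' :: t) [','] := by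
    rw [PySem.Chars.find_nonneg_iff]; exact ⟨q, t, by simp⟩
  rcases PySem.Chars.find_spec (s := q ++ ',' :: t) (sub := [',']) hnn with ⟨hpre, hmin⟩
  have hno : ∀ i, i < q.length → ¬ [','] <+: (q ++ ',' :: t).drop i := by
    intro i hi hp
    rcases hp with ⟨u, hu⟩
    have hdq : (q ++ ',' :: t).drop i = q.drop i ++ ',' :: t := by
      rw [List.drop_append_of_le_length (by omega)]
    rw [hdq] at hu
    rcases List.exists_cons_of_ne_nil (by rw [Ne, List.drop_eq_nil_iff]; omega : q.drop i ≠ []) with ⟨c0, cs0, hc⟩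
    rw [hc] at hu
    have hc0 : c0 = ',' := by simpa using congrArg (fun l => l.head?) hu.symm
    exact h (by
      have hm : c0 ∈ q.drop i := by rw [hc]; exact List.mem_cons_self
      exact hc0 ▸ List.mem_of_mem_drop hm)
  have hpq : [','] <+: (q ++ ',' :: t).drop q.length := by simp
  have hle : (PySem.Chars.find (q ++ ',' :: t) [',']).toNat ≤ q.length := by
    by_contra hgt
    exact hmin q.length (by omega) hpq
  have hge : ¬ (PySem.Chars.find (q ++ ',' :: t) [',']).toNat < q.length := fun hlt => hno _ hlt hpre
  omega

-- prefix extension through a known drop decomposition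
theorem pv_take_ext (cs q t : List Char) (n : Nat) (h : cs.drop n = q ++ ',' :: t) :
    cs.take (n + (q.length + 1)) = cs.take n ++ q ++ [','] := by
  rw [List.take_add, h]
  have h2 : q ++ ',' :: t = (q ++ [',']) ++ t := by simp
  rw [h2, List.take_append_of_le_length (by simp)]
  simp

-- join facts
theorem pv_join_cons (a : List Char) (X : List (List Char)) (hX : X ≠ []) :
    PySem.Chars.join [','] (a :: X) = a ++ ',' :: PySem.Chars.join [','] X := by
  rcases List.exists_cons_of_ne_nil hX with ⟨b, t, hb⟩
  subst hb
  rw [PySem.Chars.join_cons_cons]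
  simp [PySem.Chars.join]

-- str(int) contains no comma
theorem pv_comma_not_mem_toChars (n : Int) : ',' ∉ PySem.Int.toChars n := by
  simp only [PySem.Int.toChars]
  split <;> intro h
  · rcases List.mem_cons.1 h with h | h
    · exact absurd h (by decide)
    · have := Nat.isDigit_of_mem_toDigits (by omega) (by omega) h
      simp [Char.isDigit] at this
  · have := Nat.isDigit_of_mem_toDigits (by omega) (by omega) h
    simp [Char.isDigit] at this

-- characterisation of A's inner while-loop, by induction on the fields remaining
-- after the current scan position
theorem pv_innerA_spec (List2 : List Int) (k : Int) (jn : Nat) :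
    ∀ (rest : List (List Char)) (q : List Char) (fuel : Nat) (cs : List Char) (xn c : Nat) (y : Int),
    cs.drop (xn + c) = PySem.Chars.join [','] (q :: rest) →
    (∀ p ∈ q :: rest, ',' ∉ p) →
    rest.length < fuel →
    (c ≤ jn + 1 ∨ (c = jn + 2 ∧ y = (xn : Int))) →
    pvInnerA List2 k (jn : Int) fuel cs (xn : Int) y (c : Int) =
      if jn + 3 ≤ c + rest.length then
        cs.take (xn + c) ++ PySem.Chars.join [',']
          ((q :: rest).set (jn + 2 - c) (PySem.Int.toChars (PySem.List.pyGetD List2 (k + 2 * jn) 0)))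
      else cs := by
  intro rest
  induction rest with
  | nil =>
    intro q fuel cs xn c y hdrop hfree hfuel hreg
    rw [PySem.Chars.join_singleton] at hdrop
    cases fuel with
    | zero => omega
    | succ f =>
      rw [pvInnerA]
      have hsl : PySem.Chars.slice cs (some ((xn : Int) + (c : Int))) none = cs.drop (xn + c) := by
        rw [PySem.Chars.slice_eq_listSlice, PySem.List.slice_from cs (by positivity)]
        congr 1
      rw [hsl, hdrop, pv_find_no_comma q (hfree q List.mem_cons_self)]
      simp only [ne_eq, not_true_eq_false, if_false]
      rw [if_neg (by simp only [List.length_nil]; omega)]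
  | cons r rs ih =>
    intro q fuel cs xn c y hdrop hfree hfuel hreg
    rw [pv_join_cons q (r :: rs) (List.cons_ne_nil r rs)] at hdrop
    cases fuel with
    | zero => simp at hfuel
    | succ f =>
      rw [pvInnerA]
      have hsl : PySem.Chars.slice cs (some ((xn : Int) + (c : Int))) none = cs.drop (xn + c) := by
        rw [PySem.Chars.slice_eq_listSlice, PySem.List.slice_from cs (by positivity)]
        congr 1
      have hq : ',' ∉ q := hfree q List.mem_cons_self
      rw [hsl, hdrop, pv_find_comma q _ hq]
      rw [if_pos (by omega)]
      simp only []
      -- common facts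
      have hdrop2 : cs.drop (xn + q.length + (c + 1)) = PySem.Chars.join [','] (r :: rs) := by
        have e : xn + q.length + (c + 1) = (xn + c) + (q.length + 1) := by ring
        rw [e, ← List.drop_drop, hdrop]
        simp
      have hfree2 : ∀ p ∈ r :: rs, ',' ∉ p := fun p hp => hfree p (List.mem_cons_of_mem _ hp)
      have hfuel2 : rs.length < f := by simp only [List.length_cons] at hfuel; omega
      have hlen : (r :: rs).length = rs.length + 1 := rfl
      have htail_ne : ∀ (m : Nat) (v : List Char), (r :: rs).set m v ≠ [] := by
        intro m v hh
        have := congrArg List.length hh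
        simp at this
      rcases hreg with hc1 | ⟨hc2, hy⟩
      · -- regime 1 : c ≤ jn + 1
        by_cases hcj : c = jn + 1
        · -- counter' hits j + 2 : record y and continue
          rw [if_pos (by omega)]
          have e1 : ((xn : Int) + (q.length : Int)) = ((xn + q.length : Nat) : Int) := by push_cast; ring
          have e2 : ((c : Int) + 1) = ((c + 1 : Nat) : Int) := by push_cast; ring
          rw [e1, e2, ih r f cs (xn + q.length) (c + 1) _ hdrop2 hfree2 hfuel2
              (Or.inr ⟨by omega, rfl⟩)]
          by_cases hcond : jn + 3 ≤ c + (r :: rs).length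
          · rw [if_pos (by omega), if_pos (by omega)]
            have hidx : jn + 2 - c = 1 := by omega
            have hidx2 : jn + 2 - (c + 1) = 0 := by omega
            rw [hidx, hidx2]
            have htake : cs.take (xn + q.length + (c + 1)) = cs.take (xn + c) ++ q ++ [','] := by
              have e : xn + q.length + (c + 1) = (xn + c) + (q.length + 1) := by ring
              rw [e]; exact pv_take_ext cs q _ (xn + c) hdrop
            rw [htake]
            show _ = cs.take (xn + c) ++ PySem.Chars.join [','] (q :: (r :: rs).set 0 _)
            rw [pv_join_cons q _ (htail_ne 0 _)]
            simp [List.append_assoc]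
          · rw [if_neg (by omega), if_neg (by omega)]
        · -- counter' still below j + 2
          rw [if_neg (by omega), if_neg (by omega)]
          have e1 : ((xn : Int) + (q.length : Int)) = ((xn + q.length : Nat) : Int) := by push_cast; ring
          have e2 : ((c : Int) + 1) = ((c + 1 : Nat) : Int) := by push_cast; ring
          rw [e1, e2, ih r f cs (xn + q.length) (c + 1) y hdrop2 hfree2 hfuel2
              (Or.inl (by omega))]
          by_cases hcond : jn + 3 ≤ c + (r :: rs).length
          · rw [if_pos (by omega), if_pos (by omega)]
            have hidx : jn + 2 - c = (jn + 1 - c) + 1 := by omega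
            have hidx2 : jn + 2 - (c + 1) = jn + 1 - c := by omega
            rw [hidx, hidx2, List.set_cons_succ]
            have htake : cs.take (xn + q.length + (c + 1)) = cs.take (xn + c) ++ q ++ [','] := by
              have e : xn + q.length + (c + 1) = (xn + c) + (q.length + 1) := by ring
              rw [e]; exact pv_take_ext cs q _ (xn + c) hdrop
            rw [htake, pv_join_cons q _ (htail_ne _ _)]
            simp [List.append_assoc]
          · rw [if_neg (by omega), if_neg (by omega)]
      · -- regime 2 : c = jn + 2, y = xn : the break line fires
        rw [if_neg (by omega), if_pos (by omega)]
        have epre : y + ((c : Int) + 1) - 1 = ((xn + c : Nat) : Int) := by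
          rw [hy]; push_cast; ring
        have esuf : ((xn : Int) + (q.length : Int)) + ((c : Int) + 1) - 1
            = ((xn + c + q.length : Nat) : Int) := by push_cast; ring
        rw [epre, esuf]
        have hslt : PySem.Chars.slice cs none (some ((xn + c : Nat) : Int)) = cs.take (xn + c) := by
          rw [PySem.Chars.slice_eq_listSlice, PySem.List.slice_to_natCast]
        have hslf : PySem.Chars.slice cs (some ((xn + c + q.length : Nat) : Int)) none
            = ',' :: PySem.Chars.join [','] (r :: rs) := by
          have e : cs.drop (xn + c + q.length) = ',' :: PySem.Chars.join [','] (r :: rs) := by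
            rw [← List.drop_drop, hdrop]; simp
          rw [PySem.Chars.slice_eq_listSlice, PySem.List.slice_from_natCast, e]
        rw [hslt, hslf]
        rw [if_pos (by omega)]
        have hidx : jn + 2 - c = 0 := by omega
        rw [hidx]
        show _ = cs.take (xn + c) ++ PySem.Chars.join [','] (_ :: r :: rs)
        rw [pv_join_cons _ (r :: rs) (List.cons_ne_nil r rs)]
        simp [List.append_assoc]

-- one outer pass of A (fresh x = y = counter = 0) in terms of splitOn
theorem pv_pass (List2 : List Int) (k : Int) (jn : Nat) (cs : List Char) :
    pvInnerA List2 k (jn : Int) (cs.length + 1) cs 0 0 0 =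
      if jn + 4 ≤ (List.splitOn ',' cs).length then
        PySem.Chars.join [','] ((List.splitOn ',' cs).set (jn + 2)
          (PySem.Int.toChars (PySem.List.pyGetD List2 (k + 2 * jn) 0)))
      else cs := by
  rcases List.exists_cons_of_ne_nil (show List.splitOn ',' cs ≠ [] from List.splitOnP_ne_nil _ _)
    with ⟨q, rest, hsp⟩
  have hjoin : PySem.Chars.join [','] (List.splitOn ',' cs) = cs := List.intercalate_splitOn cs ','
  have hdrop : cs.drop (0 + 0) = PySem.Chars.join [','] (q :: rest) := by
    rw [show ((0 : Nat) + 0) = 0 from rfl, List.drop_zero, ← hsp, hjoin]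
  have hfree := pv_splitOn_comma_free cs
  rw [hsp] at hfree
  have hfuel : rest.length < cs.length + 1 := by
    have hl := pv_splitOn_length cs
    rw [hsp] at hl
    simp only [List.length_cons] at hl
    omega
  have hmain := pv_innerA_spec List2 k jn rest q (cs.length + 1) cs 0 0 0 hdrop hfree hfuel
    (Or.inl (by omega))
  simp only [Nat.cast_zero] at hmain
  rw [hmain, hsp]
  by_cases hcond : jn + 3 ≤ 0 + rest.length
  · rw [if_pos hcond, if_pos (by simp only [List.length_cons]; omega)]
    simp only [Nat.add_zero, List.take_zero, List.nil_append, Nat.sub_zero]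
  · rw [if_neg hcond, if_neg (by simp only [List.length_cons]; omega)]

-- composing the five passes of A on the field list
theorem pv_fold (List2 : List Int) (k : Int) :
    ∀ (js : List Int) (ps : List (List Char)),
    (∀ j ∈ js, 0 ≤ j) → (∀ p ∈ ps, ',' ∉ p) → ps ≠ [] →
    js.foldl (fun cs j => pvInnerA List2 k j (cs.length + 1) cs 0 0 0) (PySem.Chars.join [','] ps)
      = PySem.Chars.join [','] (js.foldl (fun ps j =>
          if (ps.length : Int) ≥ j + 4 then
            ps.set (j + 2).toNat (PySem.Int.toChars (PySem.List.pyGetD List2 (k + 2 * j) 0))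
          else ps) ps) := by
  intro js
  induction js with
  | nil => intro ps _ _ _; simp
  | cons j jt ih =>
    intro ps hjs hfree hne
    simp only [List.foldl_cons]
    obtain ⟨jn, rfl⟩ : ∃ jn : Nat, j = (jn : Int) :=
      ⟨j.toNat, (Int.toNat_of_nonneg (hjs j List.mem_cons_self)).symm⟩
    have hsp : List.splitOn ',' (PySem.Chars.join [','] ps) = ps :=
      List.splitOn_intercalate ps ',' (fun l hl => hfree l hl) hne
    have hpass := pv_pass List2 k jn (PySem.Chars.join [','] ps)
    rw [hsp] at hpass
    rw [hpass]
    have htn : ((jn : Int) + 2).toNat = jn + 2 := by omega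
    by_cases hcond : jn + 4 ≤ ps.length
    · rw [if_pos hcond, if_pos (by omega), htn]
      exact ih _ (fun x hx => hjs x (List.mem_cons_of_mem _ hx))
        (fun p hp => by
          rcases List.mem_or_eq_of_mem_set hp with h | h
          · exact hfree p h
          · rw [h]; exact pv_comma_not_mem_toChars _)
        (by
          intro hh
          have := congrArg List.length hh
          rw [List.length_set] at this
          exact hne (List.length_eq_zero_iff.mp this))
    · rw [if_neg hcond, if_neg (by omega)]
      exact ih _ (fun x hx => hjs x (List.mem_cons_of_mem _ hx)) hfree hne

-- ===== VERDICT (by name: the statement is the Claim_ definition above) =====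
theorem Update_String_spec : Claim_equal_Update_String := by
  unfold Claim_equal_Update_String
  intro Row List2 k _ _
  unfold Spec_Update_String Update_String Update_String_alt
  have hr1 : PySem.List.pyRange 0 5 1 = [0, 1, 2, 3, 4] := by decide
  have hr2 : PySem.List.pyRange 2 7 1 = List.map (· + 2) ([0, 1, 2, 3, 4] : List Int) := by decide
  rw [hr1, hr2, pv_splitOn_bridge]
  have hne : List.splitOn ',' Row.toList ≠ [] := List.splitOnP_ne_nil _ _
  have hjoin : PySem.Chars.join [','] (List.splitOn ',' Row.toList) = Row.toList :=
    List.intercalate_splitOn _ ','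
  conv_lhs => rw [← hjoin]
  rw [pv_fold List2 k [0, 1, 2, 3, 4] _ (by decide) (pv_splitOn_comma_free _) hne]
  simp only [List.foldl_map]
  have hstep : (fun (ps : List (List Char)) (j : Int) =>
        if (ps.length : Int) ≥ (j + 2) + 2 then
          ps.set (j + 2).toNat (PySem.Int.toChars (PySem.List.pyGetD List2 (k + 2 * ((j + 2) - 2)) 0))
        else ps)
      = (fun (ps : List (List Char)) (j : Int) =>
        if (ps.length : Int) ≥ j + 4 then
          ps.set (j + 2).toNat (PySem.Int.toChars (PySem.List.pyGetD List2 (k + 2 * j) 0))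
        else ps) := by
    funext ps j
    apply if_congr
    · constructor <;> intro <;> omega
    · have e : (j + 2) - 2 = j := by ring
      rw [e]
    · rfl
  rw [hstep]
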